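-- pv_equiv track=rewrite | github.com/yaoyao663/Data-structure-and-advanced-algorithm | LAB7.py | split_region
-- ===== SOURCE A (Python) =====
-- def split_region(x, y, width, height, min_size):
--     if width <= min_size or height <= min_size:
--         return [(x, y, width, height)]
--
--     mid_w = width // 2
--     mid_h = height // 2
--
--     quadrants = []
--     quadrants.extend(split_region(x, y, mid_w, mid_h, min_size))
--     quadrants.extend(split_region(x + mid_w, y, mid_w, mid_h, min_size))
--     quadrants.extend(split_region(x, y + mid_h, mid_w, mid_h, min_size))
--     quadrants.extend(split_region(x + mid_w, y + mid_h, mid_w, mid_h, min_size))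
--
--     return quadrants
-- ===== SOURCE B (Python) =====
-- def split_region(x, y, width, height, min_size):
--     if min_size < 0 and width > min_size and height > min_size:
--         # halving can never reach a region of size <= min_size
--         raise ValueError("subdivision does not terminate for negative min_size")
--     # Every region at the same depth has the same width/height, so the split
--     # tree is uniform: record the per-level quadrant offsets, then build the
--     # leaf list bottom-up, one level at a time.
--     w, h = width, height
--     dims = []
--     while w > min_size and h > min_size:
--         w //= 2
--         h //= 2
--         dims.append((w, h))
--     if not dims:
--         return [(x, y, width, height)]
--     rel = [(0, 0)]
--     for (mw, mh) in reversed(dims[1:]):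
--         rel = [(dx + ox, dy + oy)
--                for (ox, oy) in ((0, 0), (mw, 0), (0, mh), (mw, mh))
--                for (dx, dy) in rel]
--     mw, mh = dims[0]
--     return [(x + dx + ox, y + dy + oy, w, h)
--             for (ox, oy) in ((0, 0), (mw, 0), (0, mh), (mw, mh))
--             for (dx, dy) in rel]
-- ===== Notes on version B (the rewrite author's own statement) =====
-- stated objective: alternative
-- what changed: Uses the uniformity of the split tree (all regions at one depth share dimensions): collects the per-level halved dimensions once, then builds the leaf list bottom-up level by level with comprehensions instead of four-way recursion; where A's recursion never terminates (min_size < 0 with both dimensions above it, outside Pre_) B raises ValueError upfront.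
import Mathlib
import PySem

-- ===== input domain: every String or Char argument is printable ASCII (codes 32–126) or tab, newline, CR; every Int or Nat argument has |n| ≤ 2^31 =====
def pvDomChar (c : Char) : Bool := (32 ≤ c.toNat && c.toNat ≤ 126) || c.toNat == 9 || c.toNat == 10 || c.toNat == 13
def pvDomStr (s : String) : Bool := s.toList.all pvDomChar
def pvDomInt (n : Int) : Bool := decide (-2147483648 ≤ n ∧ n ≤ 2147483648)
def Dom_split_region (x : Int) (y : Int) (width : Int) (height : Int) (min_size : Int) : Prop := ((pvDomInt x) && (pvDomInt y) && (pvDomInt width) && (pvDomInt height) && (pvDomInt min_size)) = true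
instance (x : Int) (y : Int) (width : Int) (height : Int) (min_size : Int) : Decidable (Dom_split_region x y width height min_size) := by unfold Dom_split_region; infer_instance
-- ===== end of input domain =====

-- B exploits the uniformity of the split tree (all regions at one depth share their
-- dimensions) and builds the leaf list bottom-up level by level instead of recursing;
-- B raises ValueError (outside Pre_) where A's recursion never terminates.

-- ===== PORT A =====
-- fuel makes the recursion total in Lean; on every input admitted by Pre_ the fuel
-- (width.natAbs + height.natAbs bounds the recursion depth) is never exhausted.
def split_region_go (fuel : Nat) (x : Int) (y : Int) (w : Int) (h : Int) (m : Int) : List (Int × Int × Int × Int) :=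
  match fuel with
  | 0 => [(x, y, w, h)]
  | f + 1 =>
    if w ≤ m ∨ h ≤ m then [(x, y, w, h)]
    else
      let mw := PySem.Int.floordiv w 2
      let mh := PySem.Int.floordiv h 2
      split_region_go f x y mw mh m ++ split_region_go f (x + mw) y mw mh m ++
        split_region_go f x (y + mh) mw mh m ++ split_region_go f (x + mw) (y + mh) mw mh m

def split_region (x : Int) (y : Int) (width : Int) (height : Int) (min_size : Int) : List (Int × Int × Int × Int) :=
  split_region_go (width.natAbs + height.natAbs) x y width height min_size

-- ===== PORT B =====
-- Source B's while loop collecting the per-level halved dimensions; fuel makes it total in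
-- Lean (width.natAbs + height.natAbs bounds the number of iterations on Pre_ inputs);
-- returns (dims, final w, final h)
def split_region_alt_dims (fuel : Nat) (w : Int) (h : Int) (m : Int) : List (Int × Int) × Int × Int :=
  match fuel with
  | 0 => ([], w, h)
  | f + 1 =>
    if m < w ∧ m < h then
      let w' := PySem.Int.floordiv w 2
      let h' := PySem.Int.floordiv h 2
      let r := split_region_alt_dims f w' h' m
      ((w', h') :: r.1, r.2)
    else ([], w, h)

-- the tuple ((0, 0), (mw, 0), (0, mh), (mw, mh)) of Source B's comprehensions
def split_region_alt_quads (mw : Int) (mh : Int) : List (Int × Int) :=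
  [(0, 0), (mw, 0), (0, mh), (mw, mh)]

-- one loop iteration: rel = [(dx + ox, dy + oy) for (ox, oy) in quads for (dx, dy) in rel]
def split_region_alt_level (mw : Int) (mh : Int) (rel : List (Int × Int)) : List (Int × Int) :=
  (split_region_alt_quads mw mh).flatMap (fun o => rel.map (fun d => (d.1 + o.1, d.2 + o.2)))

-- Source B raises ValueError on the guard branch (those inputs are outside Pre_); the port returns [] there
def split_region_alt (x : Int) (y : Int) (width : Int) (height : Int) (min_size : Int) : List (Int × Int × Int × Int) :=
  if min_size < 0 ∧ min_size < width ∧ min_size < height then []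
  else
    let r := split_region_alt_dims (width.natAbs + height.natAbs) width height min_size
    match r.1 with
    | [] => [(x, y, width, height)]
    | d0 :: rest =>
      let rel := rest.reverse.foldl (fun rel d => split_region_alt_level d.1 d.2 rel) [((0 : Int), (0 : Int))]
      (split_region_alt_quads d0.1 d0.2).flatMap
        (fun o => rel.map (fun d => (x + d.1 + o.1, y + d.2 + o.2, r.2.1, r.2.2)))

-- ===== PRECONDITION & SPEC =====
-- Pre_ excludes exactly the inputs on which Python A never reaches a base case and dies
-- with RecursionError (min_size < 0 while both width and height exceed min_size);
-- Python B raises ValueError on exactly those inputs.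
def Pre_split_region (x : Int) (y : Int) (width : Int) (height : Int) (min_size : Int) : Prop :=
  0 ≤ min_size ∨ width ≤ min_size ∨ height ≤ min_size
instance (x : Int) (y : Int) (width : Int) (height : Int) (min_size : Int) : Decidable (Pre_split_region x y width height min_size) := by unfold Pre_split_region; infer_instance

def pvWitness_split_region : Int × Int × Int × Int × Int := (0, 0, 8, 6, 1)

def Spec_split_region (x : Int) (y : Int) (width : Int) (height : Int) (min_size : Int) (out : List (Int × Int × Int × Int)) : Prop := out = split_region_alt x y width height min_size
instance (x : Int) (y : Int) (width : Int) (height : Int) (min_size : Int) (out : List (Int × Int × Int × Int)) : Decidable (Spec_split_region x y width height min_size out) := by unfold Spec_split_region; infer_instance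

-- ===== CLAIM (what is proved, stated in full; the proofs are below) =====
def Claim_equal_split_region : Prop := ∀ (x : Int) (y : Int) (width : Int) (height : Int) (min_size : Int), Dom_split_region x y width height min_size → Pre_split_region x y width height min_size → Spec_split_region x y width height min_size (split_region x y width height min_size)

-- ===== LEMMAS AND PROOFS =====

-- fuel is sufficient for (w, h, m)
def pvOk (f : Nat) (w : Int) (h : Int) (m : Int) : Prop :=
  w ≤ m ∨ h ≤ m ∨ (0 ≤ m ∧ w.natAbs + h.natAbs ≤ f)

-- rel after Source B's loop has consumed the levels of ds (deepest level first = ds reversed)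
def pvRelOf (ds : List (Int × Int)) : List (Int × Int) :=
  ds.reverse.foldl (fun rel d => split_region_alt_level d.1 d.2 rel) [((0 : Int), (0 : Int))]

theorem pvRelOf_cons (d : Int × Int) (ds : List (Int × Int)) :
    pvRelOf (d :: ds) = split_region_alt_level d.1 d.2 (pvRelOf ds) := by
  simp [pvRelOf, List.foldl_append]

theorem pv_map_level (rel : List (Int × Int)) (mw mh x y wf hf : Int) :
    (split_region_alt_level mw mh rel).map (fun p => (x + p.1, y + p.2, wf, hf))
      = ((rel.map fun p => (x + p.1, y + p.2, wf, hf)) ++ (rel.map fun p => (x + mw + p.1, y + p.2, wf, hf)))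
          ++ ((rel.map fun p => (x + p.1, y + mh + p.2, wf, hf)) ++ (rel.map fun p => (x + mw + p.1, y + mh + p.2, wf, hf))) := by
  have q : ∀ (a b : Int),
      (rel.map (fun d : Int × Int => (d.1 + a, d.2 + b))).map (fun p : Int × Int => (x + p.1, y + p.2, wf, hf))
        = rel.map (fun p => (x + a + p.1, y + b + p.2, wf, hf)) := by
    intro a b
    rw [List.map_map]
    apply List.map_congr_left
    intro p _
    simp [Prod.ext_iff] <;> omega
  simp only [split_region_alt_level, split_region_alt_quads, List.flatMap_cons, List.flatMap_nil,
    List.append_nil, List.map_append, q, List.append_assoc]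
  simp

theorem pv_go_dims :
    ∀ (f : Nat) (w h m : Int), pvOk f w h m → ∀ (x y : Int),
    split_region_go f x y w h m
      = (pvRelOf (split_region_alt_dims f w h m).1).map
          (fun p => (x + p.1, y + p.2, (split_region_alt_dims f w h m).2.1, (split_region_alt_dims f w h m).2.2)) := by
  intro f
  induction f with
  | zero =>
    intro w h m _ x y
    simp [split_region_go, split_region_alt_dims, pvRelOf, split_region_alt_level]
  | succ f ih =>
    intro w h m hok x y
    by_cases hc : w ≤ m ∨ h ≤ m
    · have hnc : ¬ (m < w ∧ m < h) := by rcases hc with h1 | h1 <;> omega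
      simp [split_region_go, split_region_alt_dims, hc, hnc, pvRelOf, split_region_alt_level]
    · rw [not_or, not_le, not_le] at hc
      have hm : 0 ≤ m := by
        rcases hok with h1 | h1 | ⟨hm, _⟩
        · exact absurd h1 (by omega)
        · exact absurd h1 (by omega)
        · exact hm
      have hμ : w.natAbs + h.natAbs ≤ f + 1 := by
        rcases hok with h1 | h1 | ⟨_, hμ⟩
        · exact absurd h1 (by omega)
        · exact absurd h1 (by omega)
        · exact hμ
      have hok' : pvOk f (w / 2) (h / 2) m := by
        right; right; exact ⟨hm, by omega⟩
      have hgo : split_region_go (f + 1) x y w h m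
          = split_region_go f x y (w / 2) (h / 2) m ++ split_region_go f (x + w / 2) y (w / 2) (h / 2) m ++
              split_region_go f x (y + h / 2) (w / 2) (h / 2) m ++ split_region_go f (x + w / 2) (y + h / 2) (w / 2) (h / 2) m := by
        simp [split_region_go, hc.1.not_ge, hc.2.not_ge]
      have hdims : split_region_alt_dims (f + 1) w h m
          = ((w / 2, h / 2) :: (split_region_alt_dims f (w / 2) (h / 2) m).1,
             (split_region_alt_dims f (w / 2) (h / 2) m).2) := by
        simp [split_region_alt_dims, hc.1, hc.2]
      rw [hgo, hdims]
      rw [ih _ _ _ hok' x y, ih _ _ _ hok' (x + w / 2) y, ih _ _ _ hok' x (y + h / 2),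
        ih _ _ _ hok' (x + w / 2) (y + h / 2)]
      rw [pvRelOf_cons, pv_map_level]
      simp [List.append_assoc]

-- when the dims list is empty, the final (w, h) are the inputs
theorem pv_dims_nil {f : Nat} {w h m : Int}
    (hnil : (split_region_alt_dims f w h m).1 = []) :
    (split_region_alt_dims f w h m).2 = (w, h) := by
  cases f with
  | zero => rfl
  | succ f =>
    by_cases hc : m < w ∧ m < h
    · simp [split_region_alt_dims, hc] at hnil
    · simp [split_region_alt_dims, hc]

-- ===== VERDICT (by name: the statement is the Claim_ definition above) =====
theorem split_region_spec : Claim_equal_split_region := by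
  intro x y w h m _ hpre
  unfold Spec_split_region split_region split_region_alt
  have hg : ¬ (m < 0 ∧ m < w ∧ m < h) := by
    rcases hpre with h1 | h1 | h1 <;> omega
  rw [if_neg hg]
  have hok : pvOk (w.natAbs + h.natAbs) w h m := by
    rcases hpre with h1 | h1 | h1
    · right; right; exact ⟨h1, le_refl _⟩
    · exact Or.inl h1
    · exact Or.inr (Or.inl h1)
  rw [pv_go_dims _ _ _ _ hok x y]
  cases hd : (split_region_alt_dims (w.natAbs + h.natAbs) w h m).1 with
  | nil =>
    have h2 := pv_dims_nil hd
    simp [hd, h2, pvRelOf, split_region_alt_level]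
  | cons d0 rest =>
    simp only [hd]
    rw [pvRelOf_cons, pv_map_level]
    simp only [pvRelOf, split_region_alt_quads, List.flatMap_cons, List.flatMap_nil,
      List.append_nil, List.append_assoc]
    congr 1
    · apply List.map_congr_left; intro p _; simp [Prod.ext_iff] <;> omega
    congr 1
    · apply List.map_congr_left; intro p _; simp [Prod.ext_iff] <;> omega
    congr 1
    · apply List.map_congr_left; intro p _; simp [Prod.ext_iff] <;> omega
    · apply List.map_congr_left; intro p _; simp [Prod.ext_iff] <;> omega
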